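-- pv_equiv track=rewrite | github.com/AdamCottrill/FishNetPortal | fn_portal/api/utils.py | check_distinct_seasons
-- ===== SOURCE A (Python) =====
-- def check_distinct_seasons(data):
--     """A little helper function to check that seasons do not overlap -
--     return true if the values are disticnt(valid) and do not
--     overlap. returns false if the season are not distict and share
--     some dates.
--     """
--
--     if len(data) <= 1:
--         return True
--
--     # pull out the dates, but only look a records with both start and end date
--     dates = [
--         (x.get("ssn_date0"), x.get("ssn_date1"))
--         for x in data
--         if x.get("ssn_date0") and x.get("ssn_date1")
--     ]
--     dates.sort()
--
--     for i, x in enumerate(dates[:-1]):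
--         if x[1] >= dates[i + 1][0]:
--             return False
--     return True
-- ===== SOURCE B (Python) =====
-- def check_distinct_seasons(data):
--     """Brute-force all-pairs overlap check; no sorting needed."""
--     if len(data) <= 1:
--         return True
--
--     dates = [
--         (x.get("ssn_date0"), x.get("ssn_date1"))
--         for x in data
--         if x.get("ssn_date0") and x.get("ssn_date1")
--     ]
--
--     for i, x in enumerate(dates):
--         for y in dates[i + 1:]:
--             first, second = (x, y) if x <= y else (y, x)
--             if first[1] >= second[0]:
--                 return False
--     return True
-- ===== Notes on version B (the rewrite author's own statement) =====
-- stated objective: alternative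
-- what changed: B drops the sort entirely and checks every unordered pair of seasons directly (ordering each pair lexicographically and testing the earlier one's end against the later one's start), instead of A's sort-then-adjacent-sweep.
import Mathlib
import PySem

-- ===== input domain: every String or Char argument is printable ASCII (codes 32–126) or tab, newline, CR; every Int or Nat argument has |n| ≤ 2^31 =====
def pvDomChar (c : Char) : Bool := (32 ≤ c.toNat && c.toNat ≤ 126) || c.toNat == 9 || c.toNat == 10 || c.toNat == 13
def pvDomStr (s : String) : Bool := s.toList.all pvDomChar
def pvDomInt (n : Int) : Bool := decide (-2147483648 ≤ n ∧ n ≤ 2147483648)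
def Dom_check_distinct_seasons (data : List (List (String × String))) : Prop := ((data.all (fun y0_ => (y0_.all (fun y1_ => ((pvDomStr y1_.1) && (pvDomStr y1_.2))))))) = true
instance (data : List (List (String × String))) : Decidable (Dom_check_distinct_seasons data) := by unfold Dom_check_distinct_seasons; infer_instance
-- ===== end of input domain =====

-- B replaces A's sort-then-adjacent-sweep by a brute-force all-pairs overlap check (no sorting);
-- objective: alternative algorithm (same result, different strategy; not claimed faster).

-- ===== PORT A =====
-- x.get(k): dict lookup (first match in the association list)
def pvGet (x : List (String × String)) (k : String) : Option String :=
  (PySem.Dict.mk x).get? k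

-- Python truthiness of x.get(k): None and "" are falsy
def pvTruthy (o : Option String) : Bool :=
  match o with
  | none => false
  | some s => !(s == "")

-- the comprehension '[(x.get("ssn_date0"), x.get("ssn_date1")) for x in data if … and …]';
-- this exact line appears in both A and B, so both ports share it.  The '.getD ""' only
-- unwraps the 'some' that the filter already guarantees (the tuples hold plain strings).
def pvDates (data : List (List (String × String))) : List (String × String) :=
  (data.filter (fun x =>
      pvTruthy (pvGet x "ssn_date0") && pvTruthy (pvGet x "ssn_date1"))).map
    (fun x => ((pvGet x "ssn_date0").getD "", (pvGet x "ssn_date1").getD ""))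

-- A's sweep: 'for i, x in enumerate(dates[:-1]): if x[1] >= dates[i+1][0]: return False'
-- (each step looks at one adjacent pair x = dates[i], y = dates[i+1])
def pvSweep : List (String × String) → Bool
  | x :: y :: rest => if y.1 ≤ x.2 then false else pvSweep (y :: rest)
  | _ => true

def check_distinct_seasons (data : List (List (String × String))) : Bool :=
  if data.length ≤ 1 then true
  else
    -- dates.sort(): Python sorts the (str, str) tuples lexicographically, stably
    pvSweep (PySem.List.sorted2 (pvDates data) (fun p => p.1) (fun p => p.2))

-- ===== PORT B =====
-- Python tuple comparison 'x <= y' on pairs of strings (lexicographic)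
def pvLexLeB (a b : String × String) : Bool :=
  decide (a.1 < b.1) || (a.1 == b.1 && decide (a.2 ≤ b.2))

-- 'first, second = (x, y) if x <= y else (y, x); not (first[1] >= second[0])'
def pvNoOverlap (x y : String × String) : Bool :=
  let fs := if pvLexLeB x y then (x, y) else (y, x)
  !decide (fs.2.1 ≤ fs.1.2)

-- 'for i, x in enumerate(dates): for y in dates[i+1:]: …' with early False
def pvScan : List (String × String) → Bool
  | [] => true
  | x :: rest => rest.all (fun y => pvNoOverlap x y) && pvScan rest

def check_distinct_seasons_alt (data : List (List (String × String))) : Bool :=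
  if data.length ≤ 1 then true
  else pvScan (pvDates data)

-- ===== PRECONDITION & SPEC =====
def Spec_check_distinct_seasons (data : List (List (String × String))) (out : Bool) : Prop := out = check_distinct_seasons_alt data
instance (data : List (List (String × String))) (out : Bool) : Decidable (Spec_check_distinct_seasons data out) := by unfold Spec_check_distinct_seasons; infer_instance

-- ===== CLAIM (what is proved, stated in full; the proofs are below) =====
def Claim_equal_check_distinct_seasons : Prop := ∀ (data : List (List (String × String))), Dom_check_distinct_seasons data → Spec_check_distinct_seasons data (check_distinct_seasons data)

-- ===== LEMMAS AND PROOFS =====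

-- the boolean A's tuple sort compares with, as Mathlib's lexicographic strict order
lemma pvSorted2_lt_eq :
    (fun (a b : String × String) => decide (a.1 < b.1) || (!decide (b.1 < a.1) && decide (a.2 < b.2)))
      = fun (a b : String × String) => decide (toLex a < toLex b) := by
  funext a b
  rcases lt_trichotomy a.1 b.1 with h | h | h
  · simp [Prod.Lex.lt_iff, h, lt_asymm h]
  · simp [Prod.Lex.lt_iff, h]
  · simp [Prod.Lex.lt_iff, h, h.ne', (lt_asymm h : ¬ a.1 < b.1)]

-- A's tuple sort is the PySem sort keyed by the lexicographic order on pairs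
lemma pvSorted2_eq_sorted_lex (xs : List (String × String)) :
    PySem.List.sorted2 xs (fun p => p.1) (fun p => p.2) false
      = PySem.List.sorted xs (fun p => toLex p) false := by
  rw [PySem.List.sorted_eq_foldl_insertBy]
  show List.foldl (fun acc x => PySem.List.insertBy
      (fun a b => decide (a.1 < b.1) || (!decide (b.1 < a.1) && decide (a.2 < b.2))) x acc) [] xs = _
  rw [pvSorted2_lt_eq]

lemma pvLexLeB_iff (a b : String × String) : pvLexLeB a b = true ↔ toLex a ≤ toLex b := by
  simp [pvLexLeB, Prod.Lex.le_iff]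

-- on an ordered pair, B's test reduces to A's adjacent test
lemma pvNoOverlap_of_le {x y : String × String} (h : toLex x ≤ toLex y) :
    pvNoOverlap x y = !decide (y.1 ≤ x.2) := by
  have hb : pvLexLeB x y = true := (pvLexLeB_iff x y).mpr h
  simp [pvNoOverlap, hb]

lemma pvNoOverlap_symm (x y : String × String) : pvNoOverlap x y = pvNoOverlap y x := by
  by_cases h : toLex x ≤ toLex y
  · by_cases h' : toLex y ≤ toLex x
    · have hxy : x = y := toLex.injective (le_antisymm h h')
      rw [hxy]
    · have hb : ¬ pvLexLeB y x = true := fun hb => h' ((pvLexLeB_iff y x).mp hb)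
      rw [pvNoOverlap_of_le h]
      simp [pvNoOverlap, hb]
  · have h' : toLex y ≤ toLex x := le_of_not_ge h
    have hb : ¬ pvLexLeB x y = true := fun hb => h ((pvLexLeB_iff x y).mp hb)
    rw [pvNoOverlap_of_le h']
    simp [pvNoOverlap, hb]

-- B's nested loops are exactly 'no pair overlaps'
lemma pvScan_iff (l : List (String × String)) :
    pvScan l = true ↔ l.Pairwise (fun x y => pvNoOverlap x y = true) := by
  induction l with
  | nil => simp [pvScan]
  | cons x rest ih =>
      simp [pvScan, List.all_eq_true, List.pairwise_cons, ih, Bool.and_eq_true, and_comm]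

-- A's adjacent sweep on a lex-sorted list is exactly 'no ordered pair is adjacent-bad'
lemma pvSweep_iff (l : List (String × String))
    (hs : l.Pairwise (fun a b => toLex a ≤ toLex b)) :
    pvSweep l = true ↔ l.Pairwise (fun a b => a.2 < b.1) := by
  induction l with
  | nil => simp [pvSweep]
  | cons x rest ih =>
      cases rest with
      | nil => simp [pvSweep]
      | cons y rest' =>
          obtain ⟨hx, hs'⟩ := List.pairwise_cons.mp hs
          by_cases hle : y.1 ≤ x.2
          · simp only [pvSweep, if_pos hle]
            constructor
            · intro h; cases h
            · intro hp
              exact absurd ((List.pairwise_cons.mp hp).1 y (List.mem_cons_self))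
                (not_lt.mpr hle)
          · simp only [pvSweep, if_neg hle]
            rw [ih hs', List.pairwise_cons (l := y :: rest')]
            constructor
            · intro hp
              refine ⟨fun z hz => ?_, hp⟩
              rcases List.mem_cons.mp hz with rfl | hz'
              · exact not_le.mp hle
              · have hyz : toLex y ≤ toLex z := (List.pairwise_cons.mp hs').1 z hz'
                have hy1 : y.1 ≤ z.1 := by
                  rcases Prod.Lex.le_iff.mp hyz with h1 | ⟨h1, _⟩
                  · exact le_of_lt h1
                  · exact le_of_eq h1
                exact lt_of_lt_of_le (not_le.mp hle) hy1
            · exact fun ⟨_, hp⟩ => hp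

-- the heart of the equivalence: sweeping the sorted list = checking all unordered pairs
lemma pvSweep_sorted_eq_scan (l : List (String × String)) :
    pvSweep (PySem.List.sorted2 l (fun p => p.1) (fun p => p.2)) = pvScan l := by
  rw [pvSorted2_eq_sorted_lex]
  have hpw : (PySem.List.sorted l (fun p => toLex p)).Pairwise
      (fun a b => toLex a ≤ toLex b) := PySem.List.sorted_pairwise l (fun p => toLex p)
  have hperm : (PySem.List.sorted l (fun p => toLex p) false).Perm l :=
    PySem.List.sorted_perm l (fun p => toLex p) false
  have hR : l.Pairwise (fun x y => pvNoOverlap x y = true) ↔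
      (PySem.List.sorted l (fun p => toLex p) false).Pairwise
        (fun x y => pvNoOverlap x y = true) :=
    (List.Perm.pairwise_iff
      (fun {x y} h => by rwa [pvNoOverlap_symm] at h) hperm).symm
  rw [Bool.eq_iff_iff, pvSweep_iff _ hpw, pvScan_iff, hR]
  constructor
  · intro hg
    exact (hpw.and hg).imp (fun {a b} ⟨hle, hg⟩ => by
      rw [pvNoOverlap_of_le hle]
      simp [not_le.mpr hg])
  · intro hr
    exact (hpw.and hr).imp (fun {a b} ⟨hle, hR⟩ => by
      rw [pvNoOverlap_of_le hle] at hR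
      simp only [Bool.not_eq_true', decide_eq_false_iff_not, not_le] at hR
      exact hR)

-- ===== VERDICT (by name: the statement is the Claim_ definition above) =====
theorem check_distinct_seasons_spec : Claim_equal_check_distinct_seasons := by
  intro data _
  unfold Spec_check_distinct_seasons check_distinct_seasons check_distinct_seasons_alt
  by_cases h : data.length ≤ 1
  · simp [h]
  · simp only [if_neg h]
    exact pvSweep_sorted_eq_scan (pvDates data)
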